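-- pv_equiv track=rewrite | github.com/JR-WU/CADA_test | Code/Main.py | check_current_nodes_suit_for_current_req
-- ===== SOURCE A (Python) =====
-- def check_current_nodes_suit_for_current_req(nodes, usage):
--     # 复制节点资源，避免直接修改原始数据
--     temp_nodes = list(nodes.values())
--     usage_backup = usage.copy()
--     # 按照降序排列 usage，这样我们先满足最大的需求
--     usage_backup.sort(reverse=True)
--
--     can_satisfy = True
--
--     # 逐个需求检查能否分配给任意节点
--     for u in usage_backup:
--         possible = False
--         for i in range(len(temp_nodes)):
--             if temp_nodes[i] >= u:
--                 temp_nodes[i] -= u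
--                 temp_nodes.pop(i)
--                 possible = True
--                 break  # 找到合适的节点后，立即跳出循环
--         if not possible:
--             can_satisfy = False
--             break
--     return can_satisfy
-- ===== SOURCE B (Python) =====
-- def check_current_nodes_suit_for_current_req(nodes, usage):
--     caps = sorted(nodes.values(), reverse=True)
--     reqs = sorted(usage, reverse=True)
--     return len(reqs) <= len(caps) and all(c >= r for c, r in zip(caps, reqs))
-- ===== Notes on version B (the rewrite author's own statement) =====
-- stated objective: simpler
-- what changed: Replaces the greedy first-fit scan-and-pop over remaining nodes by sorting both node capacities and usage descending and comparing them element-wise with zip.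
import Mathlib
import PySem

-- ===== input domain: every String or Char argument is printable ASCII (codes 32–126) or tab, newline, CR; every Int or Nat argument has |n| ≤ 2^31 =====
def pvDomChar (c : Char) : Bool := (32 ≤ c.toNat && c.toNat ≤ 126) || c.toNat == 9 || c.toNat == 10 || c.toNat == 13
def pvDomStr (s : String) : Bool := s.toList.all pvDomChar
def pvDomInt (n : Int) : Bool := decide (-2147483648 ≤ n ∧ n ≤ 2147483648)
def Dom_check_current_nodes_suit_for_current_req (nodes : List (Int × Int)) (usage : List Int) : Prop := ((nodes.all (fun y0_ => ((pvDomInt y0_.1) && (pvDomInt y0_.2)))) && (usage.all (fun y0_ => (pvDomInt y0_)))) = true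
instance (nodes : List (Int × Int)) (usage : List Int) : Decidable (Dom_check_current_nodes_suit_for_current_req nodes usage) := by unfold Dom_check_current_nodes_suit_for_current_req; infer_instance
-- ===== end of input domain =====

-- B replaces A's greedy first-fit scan-and-pop over remaining nodes by sorting both
-- capacities and usage descending and comparing them element-wise: simpler.

-- ===== PORT A =====
-- inner 'for i in range(len(temp_nodes))' scan: first node with temp_nodes[i] >= u is
-- decremented and then popped (net effect: that element is removed); none if no node fits
def pvFindAssign : List Int → Int → Option (List Int)
  | [], _ => none
  | c :: rest, u => if u ≤ c then some rest else (pvFindAssign rest u).map (c :: ·)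

-- outer 'for u in usage_backup' loop with the can_satisfy/possible early exits
def pvGreedy : List Int → List Int → Bool
  | _, [] => true
  | temp, u :: rest =>
    match pvFindAssign temp u with
    | some temp' => pvGreedy temp' rest
    | none => false

def check_current_nodes_suit_for_current_req (nodes : List (Int × Int)) (usage : List Int) : Bool :=
  let temp_nodes := (PySem.Dict.ofList nodes).values
  let usage_backup := PySem.List.sorted usage (fun x => x) true
  pvGreedy temp_nodes usage_backup

-- ===== PORT B =====
def check_current_nodes_suit_for_current_req_alt (nodes : List (Int × Int)) (usage : List Int) : Bool :=
  let caps := PySem.List.sorted (PySem.Dict.ofList nodes).values (fun x => x) true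
  let reqs := PySem.List.sorted usage (fun x => x) true
  decide (reqs.length ≤ caps.length) && (caps.zip reqs).all (fun p => decide (p.2 ≤ p.1))

-- ===== PRECONDITION & SPEC =====
def Spec_check_current_nodes_suit_for_current_req (nodes : List (Int × Int)) (usage : List Int) (out : Bool) : Prop := out = check_current_nodes_suit_for_current_req_alt nodes usage
instance (nodes : List (Int × Int)) (usage : List Int) (out : Bool) : Decidable (Spec_check_current_nodes_suit_for_current_req nodes usage out) := by unfold Spec_check_current_nodes_suit_for_current_req; infer_instance

-- ===== CLAIM (what is proved, stated in full; the proofs are below) =====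
def Claim_equal_check_current_nodes_suit_for_current_req : Prop := ∀ (nodes : List (Int × Int)) (usage : List Int), Dom_check_current_nodes_suit_for_current_req nodes usage → Spec_check_current_nodes_suit_for_current_req nodes usage (check_current_nodes_suit_for_current_req nodes usage)

-- ===== LEMMAS AND PROOFS =====

-- number of capacities that can host a requirement r
def pvCnt (caps : List Int) (r : Int) : Nat := caps.countP (fun c => decide (r ≤ c))

theorem pvFindAssign_none_iff (caps : List Int) (u : Int) :
    pvFindAssign caps u = none ↔ pvCnt caps u = 0 := by
  induction caps with
  | nil => simp [pvFindAssign, pvCnt]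
  | cons c rest ih =>
    simp only [pvFindAssign, pvCnt, List.countP_cons]
    by_cases h : u ≤ c
    · simp [h]
    · simp only [if_neg h, h, decide_false, Option.map_eq_none_iff]
      simpa [pvCnt, h] using ih

theorem pvFindAssign_some_cnt (caps caps' : List Int) (u : Int)
    (hf : pvFindAssign caps u = some caps') :
    ∀ r : Int, r ≤ u → pvCnt caps' r + 1 = pvCnt caps r := by
  induction caps generalizing caps' with
  | nil => simp [pvFindAssign] at hf
  | cons c rest ih =>
    intro r hr
    simp only [pvFindAssign] at hf
    by_cases h : u ≤ c
    · simp only [if_pos h, Option.some.injEq] at hf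
      subst hf
      have : r ≤ c := le_trans hr h
      simp [pvCnt, this]
    · simp only [if_neg h, Option.map_eq_some_iff] at hf
      obtain ⟨rest', hrest', hcons⟩ := hf
      subst hcons
      have := ih rest' hrest' r hr
      simp only [pvCnt, List.countP_cons] at *
      omega

-- greedy first-fit on requirements sorted descending ⟺ counting characterization
theorem pvGreedy_iff_cnt (reqs : List Int) (caps : List Int)
    (hp : reqs.Pairwise (fun a b => b ≤ a)) :
    pvGreedy caps reqs = true ↔ ∀ i (h : i < reqs.length), i + 1 ≤ pvCnt caps reqs[i] := by
  induction reqs generalizing caps with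
  | nil => simp [pvGreedy]
  | cons u rest ih =>
    obtain ⟨hu, hp'⟩ := List.pairwise_cons.mp hp
    simp only [pvGreedy]
    cases hf : pvFindAssign caps u with
    | none =>
      have h0 : pvCnt caps u = 0 := (pvFindAssign_none_iff caps u).mp hf
      constructor
      · intro h; exact absurd h (by simp)
      · intro h
        have := h 0 (by simp)
        simp [h0] at this
    | some caps' =>
      rw [ih caps' hp']
      constructor
      · intro h i hi
        match i with
        | 0 =>
          have hne : pvCnt caps u ≠ 0 := fun hz =>
            by simp [(pvFindAssign_none_iff caps u).mpr hz] at hf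
          simpa using Nat.one_le_iff_ne_zero.mpr hne
        | Nat.succ j =>
          have hj : j < rest.length := by simpa using hi
          have hle : rest[j] ≤ u := hu _ (List.getElem_mem hj)
          have := pvFindAssign_some_cnt caps caps' u hf rest[j] hle
          have h2 := h j hj
          simp only [List.getElem_cons_succ]
          omega
      · intro h i hi
        have hle : rest[i] ≤ u := hu _ (List.getElem_mem hi)
        have := pvFindAssign_some_cnt caps caps' u hf rest[i] hle
        have h2 := h (i + 1) (by simpa using Nat.succ_lt_succ hi)
        simp only [List.getElem_cons_succ] at h2
        omega

-- in a descending-sorted list s, s[i] ≥ r ⟺ at least i+1 elements are ≥ r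
theorem pvSortedDesc_getElem_iff_cnt (s : List Int) (hs : s.Pairwise (fun a b => b ≤ a))
    (i : Nat) (r : Int) :
    (∃ h : i < s.length, r ≤ s[i]) ↔ i + 1 ≤ pvCnt s r := by
  induction s generalizing i with
  | nil => simp [pvCnt]
  | cons c t ih =>
    obtain ⟨hc, hp'⟩ := List.pairwise_cons.mp hs
    have hzero : ¬ r ≤ c → pvCnt t r = 0 := by
      intro h
      refine List.countP_eq_zero.mpr ?_
      intro x hx
      have : x ≤ c := hc x hx
      simp only [decide_eq_true_eq]
      omega
    match i with
    | 0 =>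
      simp only [List.length_cons, List.getElem_cons_zero, pvCnt, List.countP_cons]
      by_cases h : r ≤ c
      · simp [h]
      · simp only [h, decide_false]
        have := hzero h
        simp only [pvCnt] at this
        simp [h, this]
    | Nat.succ j =>
      have ih' := ih hp' j
      by_cases h : r ≤ c
      · have hc' : pvCnt (c :: t) r = pvCnt t r + 1 := by
          simp [pvCnt, h]
        simp only [List.length_cons, Nat.succ_lt_succ_iff, List.getElem_cons_succ, hc']
        rw [ih']
        omega
      · have hc' : pvCnt (c :: t) r = 0 := by
          have hz := hzero h
          simp [pvCnt, h] at *
          omega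
        simp only [List.length_cons, Nat.succ_lt_succ_iff, List.getElem_cons_succ, hc']
        rw [ih']
        have hz := hzero h
        omega

-- the zip-all test of B, elementwise
theorem pvZipAll_iff (s reqs : List Int) :
    (decide (reqs.length ≤ s.length) && (s.zip reqs).all (fun p => decide (p.2 ≤ p.1))) = true ↔
    ∀ i (h : i < reqs.length), ∃ h' : i < s.length, reqs[i] ≤ s[i] := by
  induction reqs generalizing s with
  | nil => simp
  | cons u rest ih =>
    cases s with
    | nil =>
      simp only [List.length_nil, List.length_cons, List.zip_nil_left]
      constructor
      · intro h; simp at h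
      · intro h
        obtain ⟨h', _⟩ := h 0 (by simp)
        simp at h'
    | cons c t =>
      simp only [List.zip_cons_cons, List.all_cons, List.length_cons,
        Nat.succ_le_succ_iff] at *
      constructor
      · intro h i hi
        have h1 : u ≤ c := by
          rcases Bool.and_eq_true_iff.mp h with ⟨_, h2⟩
          rcases Bool.and_eq_true_iff.mp h2 with ⟨h3, _⟩
          simpa using h3
        have h2 : (decide (rest.length ≤ t.length) && (t.zip rest).all (fun p => decide (p.2 ≤ p.1))) = true := by
          rcases Bool.and_eq_true_iff.mp h with ⟨ha, h2⟩
          rcases Bool.and_eq_true_iff.mp h2 with ⟨_, hb⟩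
          exact Bool.and_eq_true_iff.mpr ⟨ha, hb⟩
        match i with
        | 0 => exact ⟨by simp, by simpa using h1⟩
        | Nat.succ j =>
          have hj : j < rest.length := by simpa using hi
          obtain ⟨h', hr⟩ := (ih t).mp h2 j hj
          exact ⟨by simpa using Nat.succ_lt_succ h', by simpa using hr⟩
      · intro h
        have h0 := h 0 (by simp)
        obtain ⟨_, h0⟩ := h0
        simp only [List.getElem_cons_zero] at h0
        have hrest : ∀ i (hi : i < rest.length), ∃ h' : i < t.length, rest[i] ≤ t[i] := by
          intro i hi
          obtain ⟨h', hr⟩ := h (i + 1) (by simpa using Nat.succ_lt_succ hi)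
          exact ⟨by simpa using h', by simpa using hr⟩
        have := (ih t).mpr hrest
        rcases Bool.and_eq_true_iff.mp this with ⟨ha, hb⟩
        exact Bool.and_eq_true_iff.mpr ⟨ha, Bool.and_eq_true_iff.mpr ⟨by simpa using h0, hb⟩⟩

theorem pvCnt_perm {xs ys : List Int} (h : xs.Perm ys) (r : Int) : pvCnt xs r = pvCnt ys r :=
  h.countP_eq _

-- ===== VERDICT (by name: the statement is the Claim_ definition above) =====
theorem check_current_nodes_suit_for_current_req_spec : Claim_equal_check_current_nodes_suit_for_current_req := by
  intro nodes usage _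
  unfold Spec_check_current_nodes_suit_for_current_req
  unfold check_current_nodes_suit_for_current_req check_current_nodes_suit_for_current_req_alt
  set caps := (PySem.Dict.ofList nodes).values with hcaps
  set reqs := PySem.List.sorted usage (fun x => x) true with hreqs
  set s := PySem.List.sorted caps (fun x => x) true with hs
  have hpr : reqs.Pairwise (fun a b => b ≤ a) := by
    simpa using PySem.List.sorted_pairwise_rev usage (fun x => x)
  have hps : s.Pairwise (fun a b => b ≤ a) := by
    simpa using PySem.List.sorted_pairwise_rev caps (fun x => x)
  have hperm : s.Perm caps := PySem.List.sorted_perm caps (fun x => x) true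
  rw [Bool.eq_iff_iff]
  rw [pvGreedy_iff_cnt reqs caps hpr, pvZipAll_iff s reqs]
  constructor
  · intro h i hi
    have := h i hi
    rw [← pvCnt_perm hperm] at this
    exact (pvSortedDesc_getElem_iff_cnt s hps i reqs[i]).mpr this
  · intro h i hi
    have := (pvSortedDesc_getElem_iff_cnt s hps i reqs[i]).mp (h i hi)
    rwa [pvCnt_perm hperm] at this
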